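-- pv_equiv track=rewrite | github.com/pypi-data/pypi-mirror-368 | packages/verse-interface/verse_interface-0.0.33.tar.gz/verse_interface-0.0.33/verse/interface/api/_helper.py | predict_http_method
-- ===== SOURCE A (Python) =====
-- def predict_http_method(operation_name: str) -> str:
--     mapping = {
--         "GET": (
--             "get",
--             "aget",
--             "list",
--             "alist",
--             "query",
--             "aquery",
--             "fetch",
--             "afetch",
--             "retrieve",
--             "aretrieve",
--             "find",
--             "afind",
--             "search",
--             "asearch",
--             "read",
--             "aread",
--         ),
--         "PUT": (
--             "put",
--             "aput",
--             "update",
--             "aupdate",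
--             "replace",
--             "areplace",
--             "modify",
--             "amodify",
--             "save",
--             "asave",
--         ),
--         "DELETE": (
--             "delete",
--             "adelete",
--             "remove",
--             "aremove",
--             "destroy",
--             "adestroy",
--             "purge",
--             "apurge",
--             "clear",
--             "aclear",
--         ),
--         "PATCH": (
--             "patch",
--             "apatch",
--         ),
--     }
--     for method, prefixes in mapping.items():
--         if operation_name.startswith(prefixes):
--             return method
--     return "POST"
-- ===== SOURCE B (Python) =====
-- # One flat hash table keyed by the full prefix; classify by looking up the
-- # first k characters for each possible prefix length k (3..9).  Correct because
-- # the prefix set is prefix-free, so at most one length can ever match.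
-- _PREFIX_METHOD = {
--     "get": "GET", "aget": "GET", "list": "GET", "alist": "GET",
--     "query": "GET", "aquery": "GET", "fetch": "GET", "afetch": "GET",
--     "retrieve": "GET", "aretrieve": "GET", "find": "GET", "afind": "GET",
--     "search": "GET", "asearch": "GET", "read": "GET", "aread": "GET",
--     "put": "PUT", "aput": "PUT", "update": "PUT", "aupdate": "PUT",
--     "replace": "PUT", "areplace": "PUT", "modify": "PUT", "amodify": "PUT",
--     "save": "PUT", "asave": "PUT",
--     "delete": "DELETE", "adelete": "DELETE", "remove": "DELETE",
--     "aremove": "DELETE", "destroy": "DELETE", "adestroy": "DELETE",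
--     "purge": "DELETE", "apurge": "DELETE", "clear": "DELETE",
--     "aclear": "DELETE",
--     "patch": "PATCH", "apatch": "PATCH",
-- }
--
--
-- def predict_http_method(operation_name: str) -> str:
--     for k in range(3, 10):
--         method = _PREFIX_METHOD.get(operation_name[:k])
--         if method is not None:
--             return method
--     return "POST"
-- ===== Notes on version B (the rewrite author's own statement) =====
-- stated objective: alternative
-- what changed: B replaces A's linear scan of a method->prefix-tuple table with 38 startswith tests by a single flat hash table keyed by the full prefix, classified with at most 7 O(1) dict lookups of operation_name[:k] for the possible prefix lengths k=3..9 (correct because the prefix set is prefix-free).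
import Mathlib
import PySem

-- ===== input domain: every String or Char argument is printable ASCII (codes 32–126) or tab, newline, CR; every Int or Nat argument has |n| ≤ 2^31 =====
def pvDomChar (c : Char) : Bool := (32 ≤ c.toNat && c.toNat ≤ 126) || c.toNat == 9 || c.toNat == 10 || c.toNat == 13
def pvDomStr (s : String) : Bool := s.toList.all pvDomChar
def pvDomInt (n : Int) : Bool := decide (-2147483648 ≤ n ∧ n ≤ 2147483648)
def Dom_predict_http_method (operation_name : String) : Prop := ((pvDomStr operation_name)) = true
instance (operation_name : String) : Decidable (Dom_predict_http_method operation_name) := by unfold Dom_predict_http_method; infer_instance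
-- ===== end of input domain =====

-- B replaces A's scan of a method→prefix-tuple table (38 startswith tests) by one flat
-- hash table keyed by the full prefix, probed with operation_name[:k] for each possible
-- prefix length k = 3..9; objective: alternative (valid because the prefix set is prefix-free).

-- ===== PORT A =====
def pvMappingA : List (String × List String) :=
  [ ("GET", ["get","aget","list","alist","query","aquery","fetch","afetch",
             "retrieve","aretrieve","find","afind","search","asearch","read","aread"]),
    ("PUT", ["put","aput","update","aupdate","replace","areplace","modify","amodify","save","asave"]),
    ("DELETE", ["delete","adelete","remove","aremove","destroy","adestroy","purge","apurge","clear","aclear"]),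
    ("PATCH", ["patch","apatch"]) ]

-- the 'for method, prefixes in mapping.items(): if operation_name.startswith(prefixes): return method' loop
def pvLoopA (s : String) : List (String × List String) → String
  | [] => "POST"
  | (m, ps) :: rest =>
      if ps.any (fun p => PySem.Str.startswith s p) then m else pvLoopA s rest

def predict_http_method (operation_name : String) : String :=
  pvLoopA operation_name pvMappingA

-- ===== PORT B =====
-- _PREFIX_METHOD: flat dict prefix → method (association list, insertion order)
def pvTableB : List (String × String) :=
  [ ("get","GET"), ("aget","GET"), ("list","GET"), ("alist","GET"),
    ("query","GET"), ("aquery","GET"), ("fetch","GET"), ("afetch","GET"),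
    ("retrieve","GET"), ("aretrieve","GET"), ("find","GET"), ("afind","GET"),
    ("search","GET"), ("asearch","GET"), ("read","GET"), ("aread","GET"),
    ("put","PUT"), ("aput","PUT"), ("update","PUT"), ("aupdate","PUT"),
    ("replace","PUT"), ("areplace","PUT"), ("modify","PUT"), ("amodify","PUT"),
    ("save","PUT"), ("asave","PUT"),
    ("delete","DELETE"), ("adelete","DELETE"), ("remove","DELETE"),
    ("aremove","DELETE"), ("destroy","DELETE"), ("adestroy","DELETE"),
    ("purge","DELETE"), ("apurge","DELETE"), ("clear","DELETE"),
    ("aclear","DELETE"),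
    ("patch","PATCH"), ("apatch","PATCH") ]

-- the 'for k in range(3, 10): method = _PREFIX_METHOD.get(operation_name[:k]); …' loop
-- (dict .get = first match in the association list)
def pvLoopB (s : String) : List Int → String
  | [] => "POST"
  | k :: ks =>
      match (pvTableB.find? (fun kv => kv.1 == PySem.Str.slice s none (some k))).map Prod.snd with
      | some m => m
      | none => pvLoopB s ks

def predict_http_method_alt (operation_name : String) : String :=
  pvLoopB operation_name (PySem.List.pyRange 3 10 1)

-- ===== PRECONDITION & SPEC =====
def Spec_predict_http_method (operation_name : String) (out : String) : Prop := out = predict_http_method_alt operation_name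
instance (operation_name : String) (out : String) : Decidable (Spec_predict_http_method operation_name out) := by unfold Spec_predict_http_method; infer_instance

-- ===== CLAIM (what is proved, stated in full; the proofs are below) =====
def Claim_equal_predict_http_method : Prop := ∀ (operation_name : String), Dom_predict_http_method operation_name → Spec_predict_http_method operation_name (predict_http_method operation_name)

-- ===== LEMMAS AND PROOFS =====

-- flatten A's table to (prefix, method) pairs in scan order
def pvFlat (tbl : List (String × List String)) : List (String × String) :=
  tbl.flatMap (fun mp => mp.2.map (fun p => (p, mp.1)))

-- proof-only mirror of B's loop, over Nat prefix lengths and char lists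
def pvLoopT (l : List Char) : List Nat → String
  | [] => "POST"
  | k :: ks =>
      match (pvTableB.find? (fun kv => kv.1.toList == l.take k)).map Prod.snd with
      | some m => m
      | none => pvLoopT l ks

theorem pv_flat_eq : pvFlat pvMappingA = pvTableB := by decide

theorem pv_loopA_eq_find (s : String) (tbl : List (String × List String)) :
    pvLoopA s tbl
      = (((pvFlat tbl).find? (fun kv => PySem.Str.startswith s kv.1)).map Prod.snd).getD "POST" := by
  induction tbl with
  | nil => simp [pvLoopA, pvFlat]
  | cons mp rest ih =>
    obtain ⟨m, ps⟩ := mp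
    rw [pvLoopA]
    have hflat : pvFlat ((m, ps) :: rest) = ps.map (fun p => (p, m)) ++ pvFlat rest := by
      simp [pvFlat]
    rw [hflat, List.find?_append]
    by_cases h : ps.any (fun p => PySem.Str.startswith s p)
    · simp only [if_pos h]
      obtain ⟨p0, hp0, hsw⟩ := List.any_eq_true.mp h
      have : ((ps.map (fun p => (p, m))).find? (fun kv => PySem.Str.startswith s kv.1)).isSome := by
        rw [List.find?_isSome]
        exact ⟨(p0, m), List.mem_map_of_mem hp0, hsw⟩
      obtain ⟨kv, hkv⟩ := Option.isSome_iff_exists.mp this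
      have hm : kv.2 = m := by
        have := List.mem_map.mp (List.mem_of_find?_eq_some hkv)
        obtain ⟨p, _, hpe⟩ := this
        rw [← hpe]
      rw [hkv]
      simp [hm]
    · simp only [if_neg h]
      have hnone : (ps.map (fun p => (p, m))).find? (fun kv => PySem.Str.startswith s kv.1) = none := by
        rw [List.find?_eq_none]
        intro kv hkv hc
        obtain ⟨p, hp, hpe⟩ := List.mem_map.mp hkv
        subst hpe
        exact h (List.any_eq_true.mpr ⟨p, hp, hc⟩)
      rw [hnone]
      simpa using ih

-- two prefixes of the same list are comparable
theorem pv_prefix_comparable {p q l : List Char} (hp : p <+: l) (hq : q <+: l) :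
    p <+: q ∨ q <+: p := by
  rcases le_total p.length q.length with h | h
  · left
    rw [List.prefix_iff_eq_take.mp hp, List.prefix_iff_eq_take.mp hq]
    have ht : List.take p.length l = List.take p.length (List.take q.length l) := by
      rw [List.take_take, min_eq_left h]
    rw [ht]
    exact List.take_prefix _ _
  · right
    rw [List.prefix_iff_eq_take.mp hp, List.prefix_iff_eq_take.mp hq]
    have ht : List.take q.length l = List.take q.length (List.take p.length l) := by
      rw [List.take_take, min_eq_left h]
    rw [ht]
    exact List.take_prefix _ _

-- no key of the table is a prefix of another key (Bool form, for decide)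
theorem pv_npfx : pvTableB.Pairwise
    (fun a b => a.1.toList.isPrefixOf b.1.toList = false ∧ b.1.toList.isPrefixOf a.1.toList = false) := by
  decide

theorem pv_len : ∀ kv ∈ pvTableB, 3 ≤ kv.1.toList.length ∧ kv.1.toList.length ≤ 9 := by decide

-- at most one key of the table is a prefix of l
theorem pv_unique {l : List Char} {kv kv' : String × String}
    (h : kv ∈ pvTableB) (hp : kv.1.toList <+: l)
    (h' : kv' ∈ pvTableB) (hp' : kv'.1.toList <+: l) : kv = kv' := by
  by_contra hne
  have hsym : Symmetric (fun a b : String × String =>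
      a.1.toList.isPrefixOf b.1.toList = false ∧ b.1.toList.isPrefixOf a.1.toList = false) := by
    intro a b hab; exact ⟨hab.2, hab.1⟩
  have := (List.Pairwise.forall hsym pv_npfx) h h' hne
  rcases pv_prefix_comparable hp hp' with hc | hc
  · rw [List.isPrefixOf_iff_prefix.mpr hc] at this
    exact absurd this.1 (by simp)
  · rw [List.isPrefixOf_iff_prefix.mpr hc] at this
    exact absurd this.2 (by simp)

-- find? of a unique satisfier
theorem pv_find_unique {α : Type} (pred : α → Bool) (x : α) :
    ∀ (tbl : List α), x ∈ tbl → pred x = true → (∀ y ∈ tbl, pred y = true → y = x) →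
      tbl.find? pred = some x := by
  intro tbl
  induction tbl with
  | nil => intro h; simp at h
  | cons y ys ih =>
    intro hmem hx huniq
    by_cases hy : pred y = true
    · rw [List.find?_cons_of_pos hy, huniq y (List.mem_cons_self ..) hy]
    · rw [List.find?_cons_of_neg hy]
      rcases List.mem_cons.mp hmem with rfl | hmem'
      · exact absurd hx hy
      · exact ih hmem' hx (fun z hz => huniq z (List.mem_cons_of_mem _ hz))

theorem pv_loopT_none {l : List Char} :
    ∀ ks : List Nat, (∀ k ∈ ks, pvTableB.find? (fun kv => kv.1.toList == l.take k) = none) →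
      pvLoopT l ks = "POST" := by
  intro ks
  induction ks with
  | nil => intro _; rfl
  | cons k ks ih =>
    intro h
    rw [pvLoopT, h k (List.mem_cons_self ..)]
    exact ih (fun j hj => h j (List.mem_cons_of_mem _ hj))

theorem pv_loopT_some {l : List Char} {pm : String × String} :
    ∀ ks : List Nat,
      (∀ k ∈ ks, pvTableB.find? (fun kv => kv.1.toList == l.take k) = none ∨
                 pvTableB.find? (fun kv => kv.1.toList == l.take k) = some pm) →
      (∃ n ∈ ks, pvTableB.find? (fun kv => kv.1.toList == l.take n) = some pm) →
      pvLoopT l ks = pm.2 := by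
  intro ks
  induction ks with
  | nil => rintro _ ⟨n, hn, _⟩; simp at hn
  | cons k ks ih =>
    rintro h ⟨n, hn, hfn⟩
    rw [pvLoopT]
    rcases h k (List.mem_cons_self ..) with hk | hk
    · rw [hk]
      rcases List.mem_cons.mp hn with rfl | hn'
      · rw [hfn] at hk; exact absurd hk (by simp)
      · exact ih (fun j hj => h j (List.mem_cons_of_mem _ hj)) ⟨n, hn', hfn⟩
    · rw [hk]
      rfl

theorem pv_keyEq (s : String) (k : Int) (hk : 0 ≤ k) :
    (fun kv : String × String => kv.1 == PySem.Str.slice s none (some k))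
      = (fun kv : String × String => kv.1.toList == s.toList.take k.toNat) := by
  funext kv
  rw [Bool.eq_iff_iff, beq_iff_eq, beq_iff_eq, ← String.toList_inj, PySem.Str.toList_slice,
      PySem.Chars.slice_eq_listSlice]
  simp [PySem.List.slice_to s.toList hk]

theorem pv_loopB_toT (s : String) :
    ∀ ks : List Int, (∀ k ∈ ks, 0 ≤ k) →
      pvLoopB s ks = pvLoopT s.toList (ks.map Int.toNat) := by
  intro ks
  induction ks with
  | nil => intro _; rfl
  | cons k ks ih =>
    intro h
    rw [List.map_cons, pvLoopB, pvLoopT, pv_keyEq s k (h k (List.mem_cons_self ..))]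
    cases hf : (pvTableB.find? (fun kv => kv.1.toList == s.toList.take k.toNat)).map Prod.snd with
    | some m => rfl
    | none => exact ih (fun j hj => h j (List.mem_cons_of_mem _ hj))

-- B's loop equals the Nat-level mirror on range(3,10)
theorem pv_loopB_eq (s : String) : predict_http_method_alt s = pvLoopT s.toList [3,4,5,6,7,8,9] := by
  rw [predict_http_method_alt, show PySem.List.pyRange 3 10 1 = [3,4,5,6,7,8,9] from by decide,
      pv_loopB_toT s [3,4,5,6,7,8,9] (by decide)]
  rfl

theorem pv_main (s : String) : predict_http_method s = predict_http_method_alt s := by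
  have hA : predict_http_method s
      = ((pvTableB.find? (fun kv => PySem.Str.startswith s kv.1)).map Prod.snd).getD "POST" := by
    rw [predict_http_method, pv_loopA_eq_find, pv_flat_eq]
  rw [hA, pv_loopB_eq]
  cases hf : pvTableB.find? (fun kv => PySem.Str.startswith s kv.1) with
  | none =>
    simp only [Option.map_none, Option.getD_none]
    refine (pv_loopT_none _ ?_).symm
    intro k _
    rw [List.find?_eq_none]
    intro kv hkv hc
    have hpre : kv.1.toList <+: s.toList := by
      rw [beq_iff_eq.mp hc]
      exact List.take_prefix _ _
    exact List.find?_eq_none.mp hf kv hkv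
      (by rw [PySem.Str.startswith_eq, PySem.Chars.startswith_iff]; exact hpre)
  | some pm =>
    simp only [Option.map_some, Option.getD_some]
    have hmem : pm ∈ pvTableB := List.mem_of_find?_eq_some hf
    have hpm : pm.1.toList <+: s.toList := by
      have := List.find?_some hf
      rwa [PySem.Str.startswith_eq, PySem.Chars.startswith_iff] at this
    have hlen := pv_len pm hmem
    have hFn : pvTableB.find? (fun kv => kv.1.toList == s.toList.take pm.1.toList.length)
        = some pm := by
      apply pv_find_unique _ pm _ hmem
      · exact beq_iff_eq.mpr (List.prefix_iff_eq_take.mp hpm)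
      · intro y hy hyt
        have hypre : y.1.toList <+: s.toList := by
          rw [beq_iff_eq.mp hyt]
          exact List.take_prefix _ _
        exact pv_unique hy hypre hmem hpm
    have hall : ∀ k ∈ [3,4,5,6,7,8,9],
        pvTableB.find? (fun kv => kv.1.toList == s.toList.take k) = none ∨
        pvTableB.find? (fun kv => kv.1.toList == s.toList.take k) = some pm := by
      intro k _
      cases hFk : pvTableB.find? (fun kv => kv.1.toList == s.toList.take k) with
      | none => exact Or.inl rfl
      | some y =>
        refine Or.inr ?_
        have hmy : y ∈ pvTableB := List.mem_of_find?_eq_some hFk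
        have hypre : y.1.toList <+: s.toList := by
          have h' : y.1.toList = List.take k s.toList := by simpa using List.find?_some hFk
          rw [h']
          exact List.take_prefix _ _
        have hy := pv_unique hmy hypre hmem hpm
        rw [hy]
    have hnmem : pm.1.toList.length ∈ [3,4,5,6,7,8,9] := by
      simp only [List.mem_cons, List.not_mem_nil, or_false]
      omega
    exact (pv_loopT_some _ hall ⟨pm.1.toList.length, hnmem, hFn⟩).symm

-- ===== VERDICT (by name: the statement is the Claim_ definition above) =====
theorem predict_http_method_spec : Claim_equal_predict_http_method := by
  intro s _
  unfold Spec_predict_http_method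
  exact pv_main s
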